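-- pv_equiv track=rewrite | github.com/rrrlw/advent-of-code | 2015/day20vibe.py | first_house_part2
-- ===== SOURCE A (Python) =====
-- def first_house_part2(target: int) -> int:
--     """
--     Part 2: Each elf e visits only 50 houses (e, 2e, ..., 50e) and delivers 11*e presents.
--     Find the smallest house number with at least `target` presents.
--     """
--     # Heuristic bound; we will grow as needed
--     limit = max(1, target // 11)
--     while True:
--         presents = [0] * (limit + 1)
--         for elf in range(1, limit + 1):
--             max_house = min(limit, elf * 50)
--             add = 11 * elf
--             for house in range(elf, max_house + 1, elf):
--                 presents[house] += add
--         for house in range(1, limit + 1):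
--             if presents[house] >= target:
--                 return house
--         limit *= 2
-- ===== SOURCE B (Python) =====
-- def first_house_part2(target: int) -> int:
--     """Smallest house with >= target presents, part-2 rules (elf e delivers 11*e
--     to its first 50 multiples).  Instead of sieving a growing array, test houses
--     one at a time: the presents for a house are found by trial division up to
--     sqrt(house), gating each divisor e of the pair on house <= 50*e."""
--     house = 1
--     while True:
--         total = 0
--         d = 1
--         while d * d <= house:
--             if house % d == 0:
--                 e1 = d
--                 e2 = house // d
--                 if house <= 50 * e1:
--                     total += 11 * e1
--                 if e2 != e1 and house <= 50 * e2:
--                     total += 11 * e2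
--             d += 1
--         if total >= target:
--             return house
--         house += 1
-- ===== Notes on version B (the rewrite author's own statement) =====
-- stated objective: alternative
-- what changed: Replaces the grow-and-retry sieve over a presents array by a direct per-house divisor enumeration: houses are tested one at a time and each house's present total is computed by trial division up to sqrt(house), gating each divisor e of a pair on house <= 50*e; no array, no size heuristic, no doubling restarts.
import Mathlib
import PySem

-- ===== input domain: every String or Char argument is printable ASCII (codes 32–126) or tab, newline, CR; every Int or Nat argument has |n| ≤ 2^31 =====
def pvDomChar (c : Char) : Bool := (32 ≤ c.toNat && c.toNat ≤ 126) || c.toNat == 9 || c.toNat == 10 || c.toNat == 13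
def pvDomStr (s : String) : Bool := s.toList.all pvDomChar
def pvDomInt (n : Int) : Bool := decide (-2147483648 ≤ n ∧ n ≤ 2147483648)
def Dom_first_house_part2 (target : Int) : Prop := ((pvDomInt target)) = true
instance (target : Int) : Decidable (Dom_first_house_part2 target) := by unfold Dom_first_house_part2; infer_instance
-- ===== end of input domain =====

-- B replaces A's grow-and-retry sieve by a per-house divisor enumeration (trial division up to
-- sqrt(house)); same return value, no speed claim.

-- ===== PORT A =====
-- 'for house in range(elf, max_house + 1, elf): presents[house] += add'
def sieveElf (limit : Int) (presents : List Int) (elf : Int) : List Int :=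
  let max_house := min limit (elf * 50)
  let add := 11 * elf
  (PySem.List.pyRange elf (max_house + 1) elf).foldl
    (fun p house => PySem.List.pySetD p house (PySem.List.pyGetD p house 0 + add)) presents

-- 'presents = [0] * (limit + 1)' then 'for elf in range(1, limit + 1): …'
def buildPresents (limit : Int) : List Int :=
  (PySem.List.pyRange 1 (limit + 1) 1).foldl (sieveElf limit)
    (List.replicate (limit + 1).toNat 0)

-- 'for house in range(1, limit + 1): if presents[house] >= target: return house'
def scanHouses (target : Int) (presents : List Int) : List Int → Option Int
  | [] => none
  | h :: rest =>
    if PySem.List.pyGetD presents h 0 ≥ target then some h else scanHouses target presents rest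

-- the 'while True:' loop; fuel only makes it total (proved never to run out below)
def aLoop (target : Int) : Nat → Int → Int
  | 0, _ => 0
  | fuel + 1, limit =>
    match scanHouses target (buildPresents limit) (PySem.List.pyRange 1 (limit + 1) 1) with
    | some h => h
    | none => aLoop target fuel (limit * 2)

def first_house_part2 (target : Int) : Int :=
  aLoop target (target.toNat + 2) (max 1 (PySem.Int.floordiv target 11))

-- ===== PORT B =====
-- inner 'while d * d <= house:' loop of Source B; all quantities are nonnegative counters, so Nat's
-- %, // and * coincide with Python's here
def divisorTotal (house : Nat) : Nat → Int → Int
  | d, total =>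
    if _h : d * d ≤ house then
      let total :=
        if house % d = 0 then
          let e1 := d
          let e2 := house / d
          let total := if house ≤ 50 * e1 then total + 11 * (e1 : Int) else total
          if e2 ≠ e1 ∧ house ≤ 50 * e2 then total + 11 * (e2 : Int) else total
        else total
      divisorTotal house (d + 1) total
    else total
  termination_by d _ => house + 2 - d
  decreasing_by
    rcases Nat.eq_zero_or_pos d with h0 | h0
    · omega
    · have := Nat.le_mul_of_pos_left d h0; omega

-- outer 'while True:' loop of Source B; fuel only makes it total (proved never to run out below)
def bLoop (target : Int) : Nat → Nat → Int
  | 0, _ => 0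
  | fuel + 1, house =>
    let total := divisorTotal house 1 0
    if total ≥ target then (house : Int) else bLoop target fuel (house + 1)

def first_house_part2_alt (target : Int) : Int := bLoop target (target.toNat + 2) 1

-- ===== PRECONDITION & SPEC =====
def Spec_first_house_part2 (target : Int) (out : Int) : Prop := out = first_house_part2_alt target
instance (target : Int) (out : Int) : Decidable (Spec_first_house_part2 target out) := by unfold Spec_first_house_part2; infer_instance

-- ===== CLAIM (what is proved, stated in full; the proofs are below) =====
def Claim_equal_first_house_part2 : Prop := ∀ (target : Int), Dom_first_house_part2 target → Spec_first_house_part2 target (first_house_part2 target)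

-- ===== LEMMAS AND PROOFS =====

-- presents for house h under part-2 rules: elf e delivers 11*e to h iff e ∣ h and h ≤ 50*e
def sigma (h : Nat) : Int :=
  ((Finset.range (h + 1)).filter (fun e => 0 < e ∧ e ∣ h ∧ h ≤ 50 * e)).sum
    (fun e => (11 * e : Int))

lemma sigma_ge (h : Nat) (hh : 0 < h) : 11 * (h : Int) ≤ sigma h := by
  have hmem : h ∈ (Finset.range (h + 1)).filter (fun e => 0 < e ∧ e ∣ h ∧ h ≤ 50 * e) := by
    simp only [Finset.mem_filter, Finset.mem_range]
    exact ⟨by omega, hh, dvd_refl h, by omega⟩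
  unfold sigma
  exact Finset.single_le_sum (f := fun e : Nat => (11 * (e : Int))) (fun e _ => by positivity) hmem

lemma exSpec (target : Int) : ∃ h, 0 < h ∧ target ≤ sigma h := by
  refine ⟨target.toNat + 1, by omega, ?_⟩
  have h1 := sigma_ge (target.toNat + 1) (by omega)
  have h2 : target ≤ (target.toNat : Int) := Int.self_le_toNat target
  push_cast at h1 ⊢
  omega

def specHouse (target : Int) : Nat := Nat.find (exSpec target)

lemma specHouse_pos (target : Int) : 0 < specHouse target := (Nat.find_spec (exSpec target)).1
lemma specHouse_sat (target : Int) : target ≤ sigma (specHouse target) := (Nat.find_spec (exSpec target)).2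
lemma specHouse_min (target : Int) {h : Nat} (h0 : 0 < h) (hs : target ≤ sigma h) :
    specHouse target ≤ h := Nat.find_min' _ ⟨h0, hs⟩
lemma specHouse_le (target : Int) : specHouse target ≤ target.toNat + 1 := by
  apply specHouse_min target (by omega)
  have h1 := sigma_ge (target.toNat + 1) (by omega)
  have h2 : target ≤ (target.toNat : Int) := Int.self_le_toNat target
  push_cast at h1 ⊢
  omega

-- ---------- B side ----------

-- divisors of h not yet visited when the inner loop is at d
def Sd (h d : Nat) : Int :=
  ((Finset.range (h + 1)).filter
      (fun e => 0 < e ∧ e ∣ h ∧ h ≤ 50 * e ∧ d ≤ e ∧ d ≤ h / e)).sum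
    (fun e => (11 * e : Int))

lemma Sd_stop (h d : Nat) (hdd : h < d * d) : Sd h d = 0 := by
  unfold Sd
  apply Finset.sum_eq_zero
  intro e he
  exfalso
  simp only [Finset.mem_filter, Finset.mem_range] at he
  obtain ⟨-, h1, h2, h3, h4, h5⟩ := he
  have hA : d * d ≤ e * (h / e) := Nat.mul_le_mul h4 h5
  have hB : e * (h / e) ≤ h := by
    rw [mul_comm]; exact Nat.div_mul_le_self h e
  omega

lemma Sd_step (h d : Nat) (hd : 0 < d) (hdd : d * d ≤ h) :
    Sd h d = (if h % d = 0 then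
        (if h ≤ 50 * d then 11 * (d : Int) else 0) +
        (if h / d ≠ d ∧ h ≤ 50 * (h / d) then 11 * ((h / d : Nat) : Int) else 0)
      else 0) + Sd h (d + 1) := by
  have hsplit := Finset.sum_filter_add_sum_filter_not
      ((Finset.range (h + 1)).filter (fun e => 0 < e ∧ e ∣ h ∧ h ≤ 50 * e ∧ d ≤ e ∧ d ≤ h / e))
      (fun e => d + 1 ≤ e ∧ d + 1 ≤ h / e) (fun e => (11 * e : Int))
  have hA : ((Finset.range (h + 1)).filter
        (fun e => 0 < e ∧ e ∣ h ∧ h ≤ 50 * e ∧ d ≤ e ∧ d ≤ h / e)).filter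
        (fun e => d + 1 ≤ e ∧ d + 1 ≤ h / e)
      = (Finset.range (h + 1)).filter
        (fun e => 0 < e ∧ e ∣ h ∧ h ≤ 50 * e ∧ d + 1 ≤ e ∧ d + 1 ≤ h / e) := by
    rw [Finset.filter_filter]
    refine Finset.filter_congr ?_
    intro e _
    constructor
    · rintro ⟨⟨p1, p2, p3, -, -⟩, q1, q2⟩; exact ⟨p1, p2, p3, q1, q2⟩
    · rintro ⟨p1, p2, p3, q1, q2⟩; exact ⟨⟨p1, p2, p3, by omega, by omega⟩, q1, q2⟩
  set E := ((Finset.range (h + 1)).filter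
        (fun e => 0 < e ∧ e ∣ h ∧ h ≤ 50 * e ∧ d ≤ e ∧ d ≤ h / e)).filter
        (fun e => ¬(d + 1 ≤ e ∧ d + 1 ≤ h / e)) with hE
  have hdle : d ≤ h := le_trans (Nat.le_mul_of_pos_left d hd) hdd
  have hB : E.sum (fun e => (11 * e : Int)) = (if h % d = 0 then
        (if h ≤ 50 * d then 11 * (d : Int) else 0) +
        (if h / d ≠ d ∧ h ≤ 50 * (h / d) then 11 * ((h / d : Nat) : Int) else 0)
      else 0) := by
    by_cases hdvd : d ∣ h
    · have hdh : d ≤ h / d := (Nat.le_div_iff_mul_le hd).mpr hdd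
      have hne0 : h ≠ 0 := by omega
      have hdiv2 : h / (h / d) = d := Nat.div_div_self hdvd hne0
      have memE : ∀ e, e ∈ E ↔
          (e = d ∧ h ≤ 50 * d) ∨ (e = h / d ∧ h / d ≠ d ∧ h ≤ 50 * (h / d)) := by
        intro e
        rw [hE]
        simp only [Finset.mem_filter, Finset.mem_range]
        constructor
        · rintro ⟨⟨he, p1, p2, p3, p4, p5⟩, hq⟩
          rcases (by omega : e = d ∨ h / e = d) with rfl | hed
          · exact Or.inl ⟨rfl, p3⟩
          · have hmul : e * (h / e) = h := Nat.mul_div_cancel' p2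
            rw [hed] at hmul
            have heq : h / d = e := Nat.div_eq_of_eq_mul_left hd (by omega)
            rcases eq_or_ne e d with rfl | hne
            · exact Or.inl ⟨rfl, p3⟩
            · exact Or.inr ⟨heq.symm, by omega, by omega⟩
        · rintro (⟨he, hc⟩ | ⟨he, hne, hc⟩) <;> rw [he]
          · exact ⟨⟨by omega, hd, hdvd, hc, le_refl d, hdh⟩, by omega⟩
          · refine ⟨⟨by have := Nat.div_le_self h d; omega, by omega,
              Nat.div_dvd_of_dvd hdvd, hc, hdh, by omega⟩, by omega⟩
      rw [if_pos (Nat.dvd_iff_mod_eq_zero.mp hdvd)]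
      by_cases c2 : h / d ≠ d ∧ h ≤ 50 * (h / d) <;> by_cases c1 : h ≤ 50 * d
      · have hEe : E = {d, h / d} := by
          ext e; rw [memE e]; simp only [Finset.mem_insert, Finset.mem_singleton]; tauto
        rw [hEe, Finset.sum_pair (by omega : d ≠ h / d)]
        rw [if_pos c1, if_pos c2]
      · have hEe : E = {h / d} := by
          ext e; rw [memE e]; simp only [Finset.mem_singleton]; tauto
        rw [hEe, Finset.sum_singleton, if_neg c1, if_pos c2]
        ring
      · have hEe : E = {d} := by
          ext e; rw [memE e]; simp only [Finset.mem_singleton]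
          constructor
          · rintro (⟨rfl, -⟩ | ⟨rfl, hx⟩); · rfl
            · exact absurd hx (by tauto)
          · rintro rfl; exact Or.inl ⟨rfl, c1⟩
        rw [hEe, Finset.sum_singleton, if_pos c1, if_neg c2]
        ring
      · have hEe : E = ∅ := by
          ext e; rw [memE e]; simp only [Finset.notMem_empty, iff_false]
          rintro (⟨rfl, hx⟩ | ⟨rfl, hx⟩)
          · exact c1 hx
          · exact c2 hx
        rw [hEe, Finset.sum_empty, if_neg c1, if_neg c2]
        ring
    · rw [if_neg (fun hmod => hdvd (Nat.dvd_of_mod_eq_zero hmod))]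
      apply Finset.sum_eq_zero
      intro e he
      exfalso
      rw [hE] at he
      simp only [Finset.mem_filter, Finset.mem_range] at he
      obtain ⟨⟨-, p1, p2, -, p4, p5⟩, hq⟩ := he
      rcases (by omega : e = d ∨ h / e = d) with rfl | hed
      · exact hdvd p2
      · have hmul : e * (h / e) = h := Nat.mul_div_cancel' p2
        exact hdvd ⟨e, by rw [← hed]; exact (Nat.div_mul_cancel p2).symm⟩
  have hS : Sd h d
      = (((Finset.range (h + 1)).filter
          (fun e => 0 < e ∧ e ∣ h ∧ h ≤ 50 * e ∧ d ≤ e ∧ d ≤ h / e)).filter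
          (fun e => d + 1 ≤ e ∧ d + 1 ≤ h / e)).sum (fun e => (11 * e : Int))
        + E.sum (fun e => (11 * e : Int)) := by
    unfold Sd
    rw [hE]
    exact hsplit.symm
  have hA' : (((Finset.range (h + 1)).filter
          (fun e => 0 < e ∧ e ∣ h ∧ h ≤ 50 * e ∧ d ≤ e ∧ d ≤ h / e)).filter
          (fun e => d + 1 ≤ e ∧ d + 1 ≤ h / e)).sum (fun e => (11 * e : Int))
      = Sd h (d + 1) := by
    rw [hA]; rfl
  rw [hS, hA', hB]
  ring

lemma divisorTotal_eq (h : Nat) : ∀ (k d : Nat) (t : Int), h + 2 - d ≤ k → 0 < d →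
    divisorTotal h d t = t + Sd h d := by
  intro k
  induction k with
  | zero =>
    intro d t hk hd
    have hdd : h < d * d := by
      have := Nat.le_mul_of_pos_left d hd
      omega
    rw [divisorTotal, dif_neg (by omega), Sd_stop h d hdd]
    ring
  | succ k ih =>
    intro d t hk hd
    by_cases hdd : d * d ≤ h
    · rw [divisorTotal, dif_pos hdd]
      have hrec := ih (d + 1) (if h % d = 0 then
          (let e1 := d; let e2 := h / d;
            let t' := if h ≤ 50 * e1 then t + 11 * (e1 : Int) else t;
            if e2 ≠ e1 ∧ h ≤ 50 * e2 then t' + 11 * (e2 : Int) else t')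
        else t) (by have := Nat.le_mul_of_pos_left d hd; omega) (by omega)
      simp only at hrec ⊢
      rw [hrec, Sd_step h d hd hdd]
      split_ifs <;> ring
    · rw [divisorTotal, dif_neg hdd, Sd_stop h d (by omega)]
      ring

lemma Sd_one (h : Nat) : Sd h 1 = sigma h := by
  unfold Sd sigma
  refine Finset.sum_congr ?_ (fun _ _ => rfl)
  refine Finset.filter_congr ?_
  intro e he
  simp only [Finset.mem_range] at he
  constructor
  · rintro ⟨h1, h2, h3, _, _⟩; exact ⟨h1, h2, h3⟩
  · rintro ⟨h1, h2, h3⟩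
    refine ⟨h1, h2, h3, h1, ?_⟩
    have he2 : e ≤ h := Nat.le_of_dvd (by omega) h2
    exact (Nat.le_div_iff_mul_le h1).mpr (by omega)

lemma bTotal_eq (h : Nat) : divisorTotal h 1 0 = sigma h := by
  rw [divisorTotal_eq h (h + 2) 1 0 (by omega) (by omega), Sd_one]; ring

lemma bLoop_eq (target : Int) : ∀ (fuel house : Nat), 0 < house →
    (∀ h', 0 < h' → h' < house → sigma h' < target) →
    target.toNat + 2 ≤ house + fuel →
    bLoop target fuel house = (specHouse target : Int) := by
  intro fuel
  induction fuel with
  | zero =>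
    intro house hpos hmin hfe
    exfalso
    have hsle := specHouse_le target
    have h1 := specHouse_sat target
    have h2 := hmin (specHouse target) (specHouse_pos target) (by omega)
    omega
  | succ fuel ih =>
    intro house hpos hmin hfe
    simp only [bLoop, bTotal_eq]
    by_cases hge : sigma house ≥ target
    · rw [if_pos hge]
      have h1 : specHouse target ≤ house := specHouse_min target hpos hge
      have h2 : ¬ specHouse target < house := by
        intro hlt
        have h3 := hmin (specHouse target) (specHouse_pos target) hlt
        have h4 := specHouse_sat target
        omega
      have : house = specHouse target := by omega
      rw [this]
    · rw [if_neg hge]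
      apply ih (house + 1) (by omega) _ (by omega)
      intro h' h0 hlt
      rcases Nat.lt_succ_iff_lt_or_eq.mp hlt with h | h
      · exact hmin h' h0 h
      · subst h; omega

lemma alt_eq (target : Int) : first_house_part2_alt target = (specHouse target : Int) := by
  apply bLoop_eq target (target.toNat + 2) 1 (by omega) (by omega) (by omega)

-- ---------- A side ----------

lemma foldl_addset (add : Int) : ∀ (idxs : List Int) (p : List Int),
    (∀ i ∈ idxs, 0 ≤ i ∧ i < (p.length : Int)) → idxs.Nodup →
    (idxs.foldl (fun q i => PySem.List.pySetD q i (PySem.List.pyGetD q i 0 + add)) p).length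
        = p.length ∧
    ∀ h : Nat, h < p.length →
      PySem.List.pyGetD
          (idxs.foldl (fun q i => PySem.List.pySetD q i (PySem.List.pyGetD q i 0 + add)) p)
          (h : Int) 0
        = PySem.List.pyGetD p (h : Int) 0 + (if (h : Int) ∈ idxs then add else 0) := by
  intro idxs
  induction idxs with
  | nil =>
    intro p _ _
    exact ⟨rfl, fun h _ => by simp⟩
  | cons i rest ih =>
    intro p hmem hnd
    obtain ⟨hi0, hilt⟩ := hmem i List.mem_cons_self
    have hin : ((i.toNat : Nat) : Int) = i := Int.toNat_of_nonneg hi0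
    have hnlt : i.toNat < p.length := by omega
    simp only [List.foldl_cons]
    have hlen' : (PySem.List.pySetD p i (PySem.List.pyGetD p i 0 + add)).length = p.length :=
      PySem.List.length_pySetD p i _
    obtain ⟨ihlen, ihget⟩ := ih (PySem.List.pySetD p i (PySem.List.pyGetD p i 0 + add))
      (by intro j hj; have := hmem j (List.mem_cons_of_mem _ hj); omega)
      (List.Nodup.of_cons hnd)
    refine ⟨by rw [ihlen, hlen'], ?_⟩
    intro h hh
    rw [ihget h (by omega)]
    have hget' : PySem.List.pyGetD (PySem.List.pySetD p i (PySem.List.pyGetD p i 0 + add))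
        ((h : Nat) : Int) 0
        = if h = i.toNat then PySem.List.pyGetD p ((i.toNat : Nat) : Int) 0 + add
          else PySem.List.pyGetD p (h : Int) 0 := by
      rw [← hin]
      exact PySem.List.pyGetD_pySetD_natCast p i.toNat h _ 0 hnlt
    rw [hget']
    by_cases hcase : h = i.toNat
    · have hnotmem : ((h : Nat) : Int) ∉ rest := by
        rw [hcase, hin]; exact (List.nodup_cons.mp hnd).1
      rw [if_pos hcase, if_neg hnotmem, if_pos (by rw [hcase, hin]; exact List.mem_cons_self),
        hcase, hin]
      ring
    · have hne : ((h : Nat) : Int) ≠ i := by omega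
      rw [if_neg hcase]
      simp only [List.mem_cons, hne, false_or]

lemma sieveElf_char (limit : Int) (p : List Int) (elf : Int) (he : 1 ≤ elf)
    (hplen : (p.length : Int) = limit + 1) :
    (sieveElf limit p elf).length = p.length ∧
    ∀ h : Nat, h < p.length →
      PySem.List.pyGetD (sieveElf limit p elf) (h : Int) 0
        = PySem.List.pyGetD p (h : Int) 0 +
          (if elf ≤ (h : Int) ∧ (h : Int) ≤ min limit (elf * 50) ∧ elf ∣ (h : Int)
            then 11 * elf else 0) := by
  have hmem : ∀ x, x ∈ PySem.List.pyRange elf (min limit (elf * 50) + 1) elf ↔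
      elf ≤ x ∧ x < min limit (elf * 50) + 1 ∧ elf ∣ x - elf := fun x =>
    PySem.List.mem_pyRange_iff_of_pos (by omega) x
  have hbounds : ∀ i ∈ PySem.List.pyRange elf (min limit (elf * 50) + 1) elf,
      0 ≤ i ∧ i < (p.length : Int) := by
    intro i hi
    rw [hmem i] at hi
    have h2 : min limit (elf * 50) ≤ limit := min_le_left _ _
    omega
  have hnd : (PySem.List.pyRange elf (min limit (elf * 50) + 1) elf).Nodup := by
    rw [PySem.List.pyRange_of_pos _ _ (by omega : (0 : Int) < elf)]
    refine List.Nodup.map ?_ List.nodup_range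
    intro a b hab
    have hab' : elf + elf * (a : Int) = elf + elf * (b : Int) := hab
    have h1 : (elf : Int) * a = elf * b := by omega
    have h2 : (a : Int) = b := mul_left_cancel₀ (by omega) h1
    exact_mod_cast h2
  obtain ⟨h1, h2⟩ := foldl_addset (11 * elf)
    (PySem.List.pyRange elf (min limit (elf * 50) + 1) elf) p hbounds hnd
  simp only [sieveElf]
  refine ⟨h1, ?_⟩
  intro h hh
  have hiff : (((h : Nat) : Int) ∈ PySem.List.pyRange elf (min limit (elf * 50) + 1) elf) ↔
      (elf ≤ (h : Int) ∧ (h : Int) ≤ min limit (elf * 50) ∧ elf ∣ (h : Int)) := by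
    rw [hmem]
    constructor
    · rintro ⟨a, b, c⟩
      refine ⟨a, by omega, ?_⟩
      have := dvd_add c (dvd_refl elf)
      simpa using this
    · rintro ⟨a, b, c⟩
      exact ⟨a, by omega, dvd_sub c (dvd_refl elf)⟩
  rw [h2 h hh, if_congr hiff rfl rfl]

lemma elves_fold (limit : Int) : ∀ (elves : List Int) (p : List Int),
    (∀ e ∈ elves, 1 ≤ e) → (p.length : Int) = limit + 1 →
    (elves.foldl (sieveElf limit) p).length = p.length ∧
    ∀ h : Nat, h < p.length →
      PySem.List.pyGetD (elves.foldl (sieveElf limit) p) (h : Int) 0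
        = PySem.List.pyGetD p (h : Int) 0 +
          ((elves.map (fun e =>
            if e ≤ (h : Int) ∧ (h : Int) ≤ min limit (e * 50) ∧ e ∣ (h : Int)
              then 11 * e else 0)).sum) := by
  intro elves
  induction elves with
  | nil =>
    intro p _ _
    exact ⟨rfl, fun h _ => by simp⟩
  | cons e rest ih =>
    intro p hes hplen
    obtain ⟨hlen1, hval1⟩ := sieveElf_char limit p e (hes e List.mem_cons_self) hplen
    obtain ⟨hlen2, hval2⟩ := ih (sieveElf limit p e)
      (fun e' he' => hes e' (List.mem_cons_of_mem _ he')) (by rw [hlen1]; exact hplen)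
    simp only [List.foldl_cons, List.map_cons, List.sum_cons]
    refine ⟨by rw [hlen2, hlen1], ?_⟩
    intro h hh
    rw [hval2 h (by omega), hval1 h hh]
    ring

lemma buildPresents_char (limit : Int) (hl : 1 ≤ limit) :
    (buildPresents limit).length = (limit + 1).toNat ∧
    ∀ h : Nat, 0 < h → (h : Int) ≤ limit →
      PySem.List.pyGetD (buildPresents limit) (h : Int) 0 = sigma h := by
  have hinitlen : ((List.replicate (limit + 1).toNat (0 : Int)).length : Int) = limit + 1 := by
    rw [List.length_replicate]; omega
  obtain ⟨hlen, hval⟩ := elves_fold limit (PySem.List.pyRange 1 (limit + 1) 1)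
    (List.replicate (limit + 1).toNat 0)
    (fun e he => ((PySem.List.mem_pyRange_one).mp he).1) hinitlen
  unfold buildPresents
  refine ⟨by rw [hlen, List.length_replicate], ?_⟩
  intro h hpos hhle
  rw [hval h (by simp [List.length_replicate]; omega)]
  have hinit0 : PySem.List.pyGetD (List.replicate (limit + 1).toNat (0 : Int)) (h : Int) 0 = 0 := by
    rw [PySem.List.pyGetD_natCast]
    have hlt : h < (limit + 1).toNat := by omega
    simp [List.getD, hlt]
  rw [hinit0, zero_add]
  -- turn the list sum over range(1, limit+1) into sigma h
  rw [PySem.List.pyRange_one]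
  have hLB : (limit + 1 - 1).toNat = limit.toNat := by omega
  rw [hLB, List.map_map]
  have hlist : ((List.range limit.toNat).map
      ((fun e => if e ≤ (h : Int) ∧ (h : Int) ≤ min limit (e * 50) ∧ e ∣ (h : Int)
          then 11 * e else 0) ∘ (fun k : Nat => 1 + (k : Int)))).sum
      = ∑ k ∈ Finset.range limit.toNat,
          (if (0 < k + 1 ∧ (k + 1) ∣ h ∧ h ≤ 50 * (k + 1)) then (11 * ((k + 1 : Nat) : Int)) else 0) := by
    rw [show ((List.range limit.toNat).map
        ((fun e => if e ≤ (h : Int) ∧ (h : Int) ≤ min limit (e * 50) ∧ e ∣ (h : Int)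
            then 11 * e else 0) ∘ (fun k : Nat => 1 + (k : Int)))).sum
        = ∑ k ∈ Finset.range limit.toNat,
            (if (1 + (k : Int) ≤ (h : Int) ∧ (h : Int) ≤ min limit ((1 + (k : Int)) * 50)
                ∧ (1 + (k : Int)) ∣ (h : Int)) then 11 * (1 + (k : Int)) else 0) from rfl]
    refine Finset.sum_congr rfl ?_
    intro k hk
    by_cases hdvd : (k + 1) ∣ h
    · have hkh : k + 1 ≤ h := Nat.le_of_dvd hpos hdvd
      have hdvdZ : (1 + (k : Int)) ∣ (h : Int) := by
        have : (((k + 1 : Nat)) : Int) ∣ ((h : Nat) : Int) := Int.natCast_dvd_natCast.mpr hdvd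
        convert this using 2
        push_cast
        ring
      by_cases hc : h ≤ 50 * (k + 1)
      · rw [if_pos ⟨by omega, by constructor; omega; exact hdvdZ⟩, if_pos ⟨by omega, hdvd, hc⟩]
        push_cast
        ring
      · rw [if_neg (by omega), if_neg (by omega)]
    · have hndvdZ : ¬ (1 + (k : Int)) ∣ (h : Int) := by
        intro hc
        apply hdvd
        have : (((k + 1 : Nat)) : Int) ∣ ((h : Nat) : Int) := by
          convert hc using 2
          push_cast
          ring
        exact_mod_cast this
      rw [if_neg (by tauto), if_neg (by tauto)]
  rw [hlist]
  have hshift : ∑ k ∈ Finset.range limit.toNat,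
      (if (0 < k + 1 ∧ (k + 1) ∣ h ∧ h ≤ 50 * (k + 1)) then (11 * ((k + 1 : Nat) : Int)) else 0)
      = ∑ e ∈ Finset.range (limit.toNat + 1),
          (if (0 < e ∧ e ∣ h ∧ h ≤ 50 * e) then (11 * (e : Int)) else 0) := by
    rw [Finset.sum_range_succ']
    simp
  rw [hshift]
  have hsub : ∑ e ∈ Finset.range (limit.toNat + 1),
      (if (0 < e ∧ e ∣ h ∧ h ≤ 50 * e) then (11 * (e : Int)) else 0)
      = ∑ e ∈ Finset.range (h + 1),
          (if (0 < e ∧ e ∣ h ∧ h ≤ 50 * e) then (11 * (e : Int)) else 0) := by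
    have hss : Finset.range (h + 1) ⊆ Finset.range (limit.toNat + 1) := by
      intro x hx
      simp only [Finset.mem_range] at hx ⊢
      omega
    refine (Finset.sum_subset hss ?_).symm
    intro x hx hnx
    simp only [Finset.mem_range] at hx hnx
    rw [if_neg]
    rintro ⟨x0, xdvd, -⟩
    exact absurd (Nat.le_of_dvd hpos xdvd) (by omega)
  rw [hsub]
  unfold sigma
  rw [Finset.sum_filter]

lemma scan_char (target : Int) (limit : Int) (hl : 1 ≤ limit) :
    ∀ (k a : Nat), (limit + 1 - (a : Int)).toNat ≤ k → 1 ≤ a →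
    (∀ h', 0 < h' → h' < a → sigma h' < target) →
    scanHouses target (buildPresents limit) (PySem.List.pyRange (a : Int) (limit + 1) 1)
      = if (specHouse target : Int) ≤ limit then some (specHouse target : Int) else none := by
  intro k
  induction k with
  | zero =>
    intro a hk h1a hmin
    rw [PySem.List.pyRange_one_eq_nil (by omega)]
    have hgt : ¬ ((specHouse target : Int) ≤ limit) := by
      intro hle
      have h2 := hmin (specHouse target) (specHouse_pos target) (by omega)
      have h3 := specHouse_sat target
      omega
    simp only [scanHouses]
    rw [if_neg hgt]
  | succ k ih =>
    intro a hk h1a hmin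
    by_cases hab : (a : Int) < limit + 1
    · rw [PySem.List.pyRange_one_cons hab]
      simp only [scanHouses]
      obtain ⟨hplen, hpval⟩ := buildPresents_char limit hl
      rw [hpval a (by omega) (by omega)]
      by_cases hge : sigma a ≥ target
      · rw [if_pos hge]
        have hs1 : specHouse target ≤ a := specHouse_min target (by omega) hge
        have hs2 : ¬ specHouse target < a := by
          intro hlt
          have h2 := hmin (specHouse target) (specHouse_pos target) hlt
          have h3 := specHouse_sat target
          omega
        have heq : specHouse target = a := by omega
        rw [if_pos (by omega), heq]
      · rw [if_neg hge]
        rw [show (a : Int) + 1 = ((a + 1 : Nat) : Int) by push_cast; ring]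
        apply ih (a + 1) (by omega) (by omega)
        intro h' h0 hlt
        rcases Nat.lt_succ_iff_lt_or_eq.mp hlt with hc | hc
        · exact hmin h' h0 hc
        · subst hc; omega
    · rw [PySem.List.pyRange_one_eq_nil (by omega)]
      have hgt : ¬ ((specHouse target : Int) ≤ limit) := by
        intro hle
        have h2 := hmin (specHouse target) (specHouse_pos target) (by omega)
        have h3 := specHouse_sat target
        omega
      simp only [scanHouses]
      rw [if_neg hgt]

lemma aLoop_eq (target : Int) : ∀ (fuel : Nat) (limit : Int), 1 ≤ limit →
    (specHouse target : Int) ≤ limit * 2 ^ fuel →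
    aLoop target (fuel + 1) limit = (specHouse target : Int) := by
  intro fuel
  induction fuel with
  | zero =>
    intro limit hl hle
    simp only [pow_zero, mul_one] at hle
    have hsc := scan_char target limit hl limit.toNat 1 (by omega) (le_refl 1) (by omega)
    norm_num at hsc
    simp only [aLoop, hsc]
    rw [if_pos hle]
  | succ fuel ih =>
    intro limit hl hle
    have hsc := scan_char target limit hl limit.toNat 1 (by omega) (le_refl 1) (by omega)
    norm_num at hsc
    simp only [aLoop, hsc]
    by_cases hsle : (specHouse target : Int) ≤ limit
    · rw [if_pos hsle]
    · rw [if_neg hsle]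
      have hgoal := ih (limit * 2) (by omega)
        (by rw [show limit * 2 * 2 ^ fuel = limit * 2 ^ (fuel + 1) by ring]; exact hle)
      exact hgoal

lemma a_eq (target : Int) : first_house_part2 target = (specHouse target : Int) := by
  unfold first_house_part2
  have hl : 1 ≤ max 1 (PySem.Int.floordiv target 11) := le_max_left _ _
  rw [show target.toNat + 2 = (target.toNat + 1) + 1 from rfl]
  apply aLoop_eq target (target.toNat + 1) _ hl
  have h1 : specHouse target ≤ target.toNat + 1 := specHouse_le target
  have h2 : target.toNat + 1 < 2 ^ (target.toNat + 1) := Nat.lt_two_pow_self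
  have h3 : (specHouse target : Int) ≤ ((2 : Nat) : Int) ^ (target.toNat + 1) := by
    push_cast
    exact_mod_cast Nat.le_of_lt (lt_of_le_of_lt h1 h2)
  calc (specHouse target : Int) ≤ ((2 : Nat) : Int) ^ (target.toNat + 1) := h3
    _ ≤ max 1 (PySem.Int.floordiv target 11) * 2 ^ (target.toNat + 1) := by
        rw [show ((2 : Nat) : Int) = (2 : Int) by norm_num]
        exact le_mul_of_one_le_left (by positivity) (le_max_left _ _)

-- ===== VERDICT (by name: the statement is the Claim_ definition above) =====
theorem first_house_part2_spec : Claim_equal_first_house_part2 := by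
  intro target _
  unfold Spec_first_house_part2
  rw [a_eq, alt_eq]
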